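-- pv_equiv track=rewrite | github.com/bksahu/dsa | patterns/sliding_window/longest_subarray_with_1s_after_replacement.py | solution
-- ===== SOURCE A (Python) =====
-- def solution(a, k):
--     win_start, max_len = 0, 0
--     no_of_zeros = 0
--
--     for win_end in range(len(a)):
--         # import ipdb; ipdb.set_trace()
--         if a[win_end] == 0:
--             no_of_zeros += 1
--
--         # Using if intead of while loop because the max size will not DECREASE
--         # anymore but will INCREASE or be SAME because we are increamenting
--         # win_star everytime until no_of_zeros > k. For example,
--         # a = [1,1,1,0,0,0,0,0...], k=2 the window size is always going to be 5.
--         # Another example a = [1,1,1,0,0,0......,1,1,1,1] is going to be 5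
--         # untill win_end meets the first of the last 1s then max_len is
--         # suddenly going to change to 6
--         if no_of_zeros > k:
--             left_num = a[win_start]
--             if left_num == 0:
--                 no_of_zeros -= 1
--             win_start += 1
--
--         max_len = max(max_len, win_end - win_start + 1)
--     return max_len
-- ===== SOURCE B (Python) =====
-- def solution(a, k):
--     n = len(a)
--     # prefix zero counts: z[j] = number of zeros in a[:j]
--     z = [0]
--     for x in a:
--         z.append(z[-1] + (1 if x == 0 else 0))
--     best = 0
--     for end in range(n):
--         # smallest s with z[s] >= z[end+1] - k  (binary search on the monotone prefix)
--         target = z[end + 1] - k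
--         lo, hi = 0, n + 1
--         while lo < hi:
--             mid = (lo + hi) // 2
--             if z[mid] < target:
--                 lo = mid + 1
--             else:
--                 hi = mid
--         cand = end - lo + 1
--         if cand > best:
--             best = cand
--     return best
-- ===== Notes on version B (the rewrite author's own statement) =====
-- stated objective: alternative
-- what changed: Replaced the two-pointer sliding window by a prefix-zero-count table plus a per-end binary search for the smallest valid start index.
import Mathlib
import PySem

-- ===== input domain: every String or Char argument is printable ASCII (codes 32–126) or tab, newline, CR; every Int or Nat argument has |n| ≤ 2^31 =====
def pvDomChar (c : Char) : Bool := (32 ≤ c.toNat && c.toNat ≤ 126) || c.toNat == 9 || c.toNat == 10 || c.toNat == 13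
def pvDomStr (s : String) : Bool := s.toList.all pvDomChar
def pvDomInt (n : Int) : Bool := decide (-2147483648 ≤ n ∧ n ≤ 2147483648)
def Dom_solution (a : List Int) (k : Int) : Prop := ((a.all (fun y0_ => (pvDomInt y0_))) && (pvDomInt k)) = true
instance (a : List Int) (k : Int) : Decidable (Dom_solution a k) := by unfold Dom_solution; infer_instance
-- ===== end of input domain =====

-- B replaces A's two-pointer sliding window by a prefix-zero-count table plus a per-end
-- binary search for the smallest valid start; alternative algorithm, equal on all inputs.


-- ===== PORT A =====
-- both index accesses are provably in range (win_end ∈ range(len a), win_start ≤ win_end),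
-- so Python's a[...] is ported as pyGetD; the default 0 is never used
def solution (a : List Int) (k : Int) : Int :=
  let st := (PySem.List.pyRange 0 (a.length : Int) 1).foldl
    (fun (st : Int × Int × Int) (winEnd : Int) =>
      let winStart := st.1
      let maxLen := st.2.1
      let zeros := st.2.2
      let zeros := if PySem.List.pyGetD a winEnd 0 = 0 then zeros + 1 else zeros
      let p : Int × Int :=
        if zeros > k then
          (winStart + 1, if PySem.List.pyGetD a winStart 0 = 0 then zeros - 1 else zeros)
        else (winStart, zeros)
      (p.1, max maxLen (winEnd - p.1 + 1), p.2))
    (0, 0, 0)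
  st.2.1

-- ===== PORT B =====
-- the hand-written while-loop binary search of Source B (bisect_left on the prefix table)
def bisectLeft (z : List Int) (t : Int) (lo hi : Nat) : Nat :=
  if _h : lo < hi then
    let mid := (lo + hi) / 2
    if PySem.List.pyGetD z (mid : Int) 0 < t then bisectLeft z t (mid + 1) hi
    else bisectLeft z t lo mid
  else lo
termination_by hi - lo
decreasing_by all_goals omega

-- z[-1] is ported as pyGetD z (-1) 0; z is never empty so the default is never used
def solution_alt (a : List Int) (k : Int) : Int :=
  let n := a.length
  let z := a.foldl (fun (z : List Int) x => z ++ [PySem.List.pyGetD z (-1) 0 + (if x = 0 then 1 else 0)]) [0]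
  (PySem.List.pyRange 0 (n : Int) 1).foldl
    (fun best e =>
      let t := PySem.List.pyGetD z (e + 1) 0 - k
      let lo := bisectLeft z t 0 (n + 1)
      let cand := e - (lo : Int) + 1
      if cand > best then cand else best) 0

-- ===== PRECONDITION & SPEC =====
def Spec_solution (a : List Int) (k : Int) (out : Int) : Prop := out = solution_alt a k
instance (a : List Int) (k : Int) (out : Int) : Decidable (Spec_solution a k out) := by unfold Spec_solution; infer_instance

-- ===== CLAIM (what is proved, stated in full; the proofs are below) =====
def Claim_equal_solution : Prop := ∀ (a : List Int) (k : Int), Dom_solution a k → Spec_solution a k (solution a k)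

-- ===== LEMMAS AND PROOFS =====

-- number of zeros among the first j elements of a
def Zc (a : List Int) (j : Nat) : Int := ((a.take j).countP (fun x => x == 0) : Nat)

-- the prefix table B builds
def zlist (a : List Int) : List Int :=
  a.foldl (fun (z : List Int) x => z ++ [PySem.List.pyGetD z (-1) 0 + (if x = 0 then 1 else 0)]) [0]

-- a window [u..e] with at most k zeros
def ValidW (a : List Int) (k : Int) (u e : Nat) : Prop :=
  u ≤ e ∧ e < a.length ∧ Zc a (e + 1) - Zc a u ≤ k

-- m is the answer: nonnegative, dominates every valid window, and is 0 or realized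
def GoodM (a : List Int) (k : Int) (m : Int) : Prop :=
  0 ≤ m ∧ (∀ u e, ValidW a k u e → (e : Int) - u + 1 ≤ m) ∧
    (m = 0 ∨ ∃ u e, ValidW a k u e ∧ m = (e : Int) - u + 1)

lemma Zc_succ (a : List Int) (j : Nat) (h : j < a.length) :
    Zc a (j + 1) = Zc a j + (if a[j] = 0 then 1 else 0) := by
  rw [Zc, Zc, List.take_add_one, List.getElem?_eq_getElem h, List.countP_append]
  split_ifs with h0 <;> simp [h0]

lemma Zc_mono (a : List Int) {i j : Nat} (hij : i ≤ j) : Zc a i ≤ Zc a j := by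
  have : a.take i = (a.take j).take i := by rw [List.take_take, Nat.min_eq_left hij]
  rw [Zc, Zc, this]
  have h2 : (a.take j) = (a.take j).take i ++ (a.take j).drop i := (List.take_append_drop i _).symm
  calc (((a.take j).take i).countP (fun x => x == 0) : Int)
      ≤ (((a.take j).take i).countP (fun x => x == 0) : Int)
        + (((a.take j).drop i).countP (fun x => x == 0) : Int) := by
          have : (0:Int) ≤ (((a.take j).drop i).countP (fun x => x == 0) : Nat) := Int.natCast_nonneg _
          omega
    _ = _ := by rw [← Nat.cast_add, ← List.countP_append, ← h2]

lemma zlist_eq (a : List Int) :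
    zlist a = (List.range (a.length + 1)).map (fun j => Zc a j) := by
  induction a using List.reverseRecOn with
  | nil => simp [zlist, Zc]
  | append_singleton xs x ih =>
    rw [zlist, List.foldl_append] at *
    rw [ih]
    have hlast : PySem.List.pyGetD ((List.range (xs.length + 1)).map (fun j => Zc xs j)) (-1) 0
        = Zc xs xs.length := by
      rw [List.range_succ, List.map_append]
      exact PySem.List.pyGetD_neg_one_append_singleton _ _ _
    rw [List.foldl_cons, List.foldl_nil, hlast]
    have h1 : ∀ j ∈ List.range (xs.length + 1), Zc xs j = Zc (xs ++ [x]) j := by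
      intro j hj
      rw [List.mem_range] at hj
      unfold Zc
      rw [List.take_append_of_le_length (by omega)]
    have h2 : Zc (xs ++ [x]) (xs.length + 1) = Zc xs xs.length + (if x = 0 then 1 else 0) := by
      rw [Zc_succ _ _ (by simp), Zc]
      rw [List.take_append_of_le_length (le_refl _)]
      simp [Zc]
    rw [List.map_congr_left h1]
    have h3 : List.range (xs.length + 1 + 1) = List.range (xs.length + 1) ++ [xs.length + 1] :=
      List.range_succ
    simp only [List.length_append, List.length_singleton]
    rw [h3, List.map_append, List.map_singleton, ← h2]

lemma zget (a : List Int) (j : Nat) (h : j ≤ a.length) :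
    PySem.List.pyGetD (zlist a) (j : Int) 0 = Zc a j := by
  rw [zlist_eq, PySem.List.pyGetD_natCast]
  rw [List.getD_eq_getElem?_getD, List.getElem?_map, List.getElem?_range (by omega)]
  rfl

lemma bisect_correct (a : List Int) (t : Int) (d lo hi : Nat) (hd : hi - lo = d)
    (hlh : lo ≤ hi) (hhi : hi ≤ a.length + 1)
    (hP : ∀ i, i < lo → Zc a i < t) (hQ : ∀ i, hi ≤ i → i ≤ a.length → t ≤ Zc a i) :
    (∀ i, i < bisectLeft (zlist a) t lo hi → Zc a i < t) ∧
      (∀ i, bisectLeft (zlist a) t lo hi ≤ i → i ≤ a.length → t ≤ Zc a i) ∧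
      bisectLeft (zlist a) t lo hi ≤ hi := by
  induction d using Nat.strong_induction_on generalizing lo hi with
  | _ d ih =>
  rw [bisectLeft]
  by_cases h : lo < hi
  · rw [dif_pos h]
    have hmid1 : lo ≤ (lo + hi) / 2 := by omega
    have hmid2 : (lo + hi) / 2 < hi := by omega
    have hz : PySem.List.pyGetD (zlist a) (((lo + hi) / 2 : Nat) : Int) 0 = Zc a ((lo + hi) / 2) :=
      zget a _ (by omega)
    simp only [hz]
    split_ifs with hcmp
    · have res := ih (hi - ((lo + hi) / 2 + 1)) (by omega) ((lo + hi) / 2 + 1) hi rfl (by omega) hhi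
        (fun i h1 => lt_of_le_of_lt (Zc_mono a (by omega)) hcmp) hQ
      exact ⟨res.1, res.2.1, le_trans res.2.2 (le_refl _)⟩
    · have res := ih (((lo + hi) / 2) - lo) (by omega) lo ((lo + hi) / 2) rfl (by omega) (by omega) hP
        (fun i h1 h2 => le_trans (not_lt.mp hcmp) (Zc_mono a h1))
      exact ⟨res.1, res.2.1, le_trans res.2.2 (by omega)⟩
  · rw [dif_neg h]
    exact ⟨hP, fun i h1 h2 => hQ i (by omega) h2, by omega⟩

lemma GoodM_unique (a : List Int) (k : Int) (m m' : Int)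
    (h : GoodM a k m) (h' : GoodM a k m') : m = m' := by
  obtain ⟨h0, hub, hre⟩ := h
  obtain ⟨h0', hub', hre'⟩ := h'
  have hle : m ≤ m' := by
    rcases hre with h | ⟨u, e, hv, hm⟩
    · omega
    · have := hub' u e hv; omega
  have hge : m' ≤ m := by
    rcases hre' with h | ⟨u, e, hv, hm⟩
    · omega
    · have := hub u e hv; omega
  omega

-- B's fold after processing ends 0..i-1
def BB (a : List Int) (k : Int) (i : Nat) : Int :=
  (PySem.List.pyRange 0 (i : Int) 1).foldl
    (fun best e =>
      let t := PySem.List.pyGetD (zlist a) (e + 1) 0 - k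
      let lo := bisectLeft (zlist a) t 0 (a.length + 1)
      let cand := e - (lo : Int) + 1
      if cand > best then cand else best) 0

lemma B_fold (a : List Int) (k : Int) (i : Nat) (hin : i ≤ a.length) :
    0 ≤ BB a k i ∧ (∀ u e, e < i → ValidW a k u e → (e : Int) - u + 1 ≤ BB a k i) ∧
      (BB a k i = 0 ∨ ∃ u e, ValidW a k u e ∧ BB a k i = (e : Int) - u + 1) := by
  induction i with
  | zero =>
    rw [BB, PySem.List.pyRange_one_eq_nil (by omega)]
    exact ⟨le_refl 0, fun u e he => by omega, Or.inl rfl⟩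
  | succ i ih =>
    obtain ⟨ih0, ihub, ihre⟩ := ih (by omega)
    have hcast : ((i + 1 : Nat) : Int) = (i : Int) + 1 := by push_cast; ring
    rw [BB, hcast, PySem.List.pyRange_one_succ_right (by omega), List.foldl_append,
      List.foldl_cons, List.foldl_nil, ← BB]
    have ht : PySem.List.pyGetD (zlist a) ((i : Int) + 1) 0 = Zc a (i + 1) := by
      rw [← hcast]; exact zget a (i + 1) (by omega)
    rw [ht]
    obtain ⟨hrP, hrQ, hrle⟩ := bisect_correct a (Zc a (i + 1) - k) (a.length + 1) 0 (a.length + 1)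
      (by omega) (by omega) (le_refl _) (fun j hj => by omega) (fun j h1 h2 => by omega)
    set r := bisectLeft (zlist a) (Zc a (i + 1) - k) 0 (a.length + 1) with hr
    by_cases hc : (i : Int) - (r : Int) + 1 > BB a k i
    · rw [if_pos hc]
      refine ⟨by omega, ?_, ?_⟩
      · intro u e he hv
        rcases Nat.lt_succ_iff_lt_or_eq.mp he with he' | he'
        · have := ihub u e he' hv; omega
        · subst he'
          obtain ⟨hue, hen, hz⟩ := hv
          have hut : Zc a (e + 1) - k ≤ Zc a u := by omega
          have hru : r ≤ u := by
            by_contra hcon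
            have := hrP u (by omega)
            omega
          omega
      · right
        have hri : r ≤ i := by
          by_contra hcon
          have : (r : Int) ≥ (i : Int) + 1 := by exact_mod_cast Nat.succ_le_of_lt (by omega)
          omega
        refine ⟨r, i, ⟨hri, by omega, ?_⟩, rfl⟩
        have := hrQ r (le_refl r) (by omega)
        omega
    · rw [if_neg hc]
      refine ⟨ih0, ?_, ihre⟩
      intro u e he hv
      rcases Nat.lt_succ_iff_lt_or_eq.mp he with he' | he'
      · exact ihub u e he' hv
      · subst he'
        obtain ⟨hue, hen, hz⟩ := hv
        have hut : Zc a (e + 1) - k ≤ Zc a u := by omega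
        have hru : r ≤ u := by
          by_contra hcon
          have := hrP u (by omega)
          omega
        omega

lemma B_good (a : List Int) (k : Int) : GoodM a k (solution_alt a k) := by
  have : solution_alt a k = BB a k a.length := rfl
  rw [GoodM, this]
  obtain ⟨h0, hub, hre⟩ := B_fold a k a.length (le_refl _)
  exact ⟨h0, fun u e hv => hub u e hv.2.1 hv, hre⟩

lemma aget (a : List Int) (j : Nat) (h : j < a.length) :
    PySem.List.pyGetD a (j : Int) 0 = a[j] := by
  simp [PySem.List.pyGetD_natCast, List.getD_eq_getElem?_getD, List.getElem?_eq_getElem h]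

-- A's loop body, name for the lambda in `solution`
def stepA (a : List Int) (k : Int) (st : Int × Int × Int) (winEnd : Int) : Int × Int × Int :=
  let winStart := st.1
  let maxLen := st.2.1
  let zeros := st.2.2
  let zeros := if PySem.List.pyGetD a winEnd 0 = 0 then zeros + 1 else zeros
  let p : Int × Int :=
    if zeros > k then
      (winStart + 1, if PySem.List.pyGetD a winStart 0 = 0 then zeros - 1 else zeros)
    else (winStart, zeros)
  (p.1, max maxLen (winEnd - p.1 + 1), p.2)

-- A's state after processing indices 0..i-1
def AA (a : List Int) (k : Int) (i : Nat) : Int × Int × Int :=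
  (PySem.List.pyRange 0 (i : Int) 1).foldl (stepA a k) (0, 0, 0)

lemma stepA_eq (a : List Int) (k : Int) (i sN : Nat) (m : Int) (hi : i < a.length) (hsN : sN ≤ i) :
    stepA a k ((sN : Int), m, Zc a i - Zc a sN) (i : Int) =
      if Zc a (i + 1) - Zc a sN > k
      then ((sN : Int) + 1, max m ((i : Int) - ((sN : Int) + 1) + 1), Zc a (i + 1) - Zc a (sN + 1))
      else ((sN : Int), max m ((i : Int) - (sN : Int) + 1), Zc a (i + 1) - Zc a sN) := by
  have e1 := Zc_succ a i hi
  have e2 := Zc_succ a sN (by omega)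
  rw [stepA, aget a i hi, aget a sN (by omega)]
  by_cases h1 : a[i] = 0 <;> by_cases h2 : a[sN] = 0 <;>
    simp only [h1, h2, e1, e2] <;>
    split_ifs <;> simp [Prod.ext_iff] <;> omega

lemma A_fold (a : List Int) (k : Int) (i : Nat) (hin : i ≤ a.length) :
    ∃ sN : Nat, sN ≤ i ∧
      AA a k i = ((sN : Int), (i : Int) - (sN : Int), Zc a i - Zc a sN) ∧
      (∀ u e, e < i → ValidW a k u e → (e : Int) - u + 1 ≤ (i : Int) - (sN : Int)) ∧
      ((i : Int) - (sN : Int) = 0 ∨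
        ∃ u e, ValidW a k u e ∧ e < i ∧ (i : Int) - (sN : Int) = (e : Int) - u + 1) := by
  induction i with
  | zero =>
    refine ⟨0, le_refl 0, ?_, fun u e he => by omega, Or.inl (by simp)⟩
    rw [AA, PySem.List.pyRange_one_eq_nil (by omega)]
    simp
  | succ i ih =>
    obtain ⟨sN, hsN, heq, hub, hre⟩ := ih (by omega)
    have hi : i < a.length := by omega
    have hcast : ((i + 1 : Nat) : Int) = (i : Int) + 1 := by push_cast; ring
    have hpeel : AA a k (i + 1) = stepA a k (AA a k i) (i : Int) := by
      rw [AA, hcast, PySem.List.pyRange_one_succ_right (by omega), List.foldl_append,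
        List.foldl_cons, List.foldl_nil, ← AA]
    rw [heq, stepA_eq a k i sN _ hi hsN] at hpeel
    by_cases hk : Zc a (i + 1) - Zc a sN > k
    · -- shift: window start advances, length stays
      rw [if_pos hk] at hpeel
      refine ⟨sN + 1, by omega, ?_, ?_, ?_⟩
      · rw [hpeel]
        have : max ((i : Int) - (sN : Int)) ((i : Int) - ((sN : Int) + 1) + 1)
            = (i : Int) - (sN : Int) := by omega
        rw [this]
        simp only [Prod.mk.injEq]
        push_cast
        and_intros <;> first | rfl | trivial | omega
      · intro u e he hv
        push_cast
        rcases Nat.lt_succ_iff_lt_or_eq.mp he with he' | he'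
        · have := hub u e he' hv; omega
        · subst he'
          obtain ⟨hue, hen, hz⟩ := hv
          have hsu : sN + 1 ≤ u := by
            by_contra hcon
            have : Zc a u ≤ Zc a sN := Zc_mono a (by omega)
            omega
          omega
      · push_cast
        rcases hre with h0 | ⟨u, e, hv, he, hm⟩
        · left; omega
        · right; exact ⟨u, e, hv, by omega, by omega⟩
    · -- no shift: window grows by one
      rw [if_neg hk] at hpeel
      refine ⟨sN, by omega, ?_, ?_, ?_⟩
      · rw [hpeel]
        have : max ((i : Int) - (sN : Int)) ((i : Int) - (sN : Int) + 1)
            = (i : Int) - (sN : Int) + 1 := by omega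
        rw [this]
        simp only [Prod.mk.injEq]
        push_cast
        and_intros <;> first | rfl | trivial | omega
      · intro u e he hv
        push_cast
        rcases Nat.lt_succ_iff_lt_or_eq.mp he with he' | he'
        · have := hub u e he' hv; omega
        · subst he'
          obtain ⟨hue, hen, hz⟩ := hv
          by_cases husN : sN ≤ u
          · omega
          · -- u < sN: the window (u, i-1) was valid, contradicting the invariant
            exfalso
            have hi1 : 1 ≤ e := by omega
            have hvv : ValidW a k u (e - 1) := by
              refine ⟨by omega, by omega, ?_⟩
              have h1 : Zc a (e - 1 + 1) ≤ Zc a (e + 1) := Zc_mono a (by omega)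
              omega
            have := hub u (e - 1) (by omega) hvv
            have hc1 : ((e - 1 : Nat) : Int) = (e : Int) - 1 := by omega
            omega
      · right
        refine ⟨sN, i, ⟨hsN, hi, by omega⟩, by omega, by push_cast; omega⟩

lemma A_good (a : List Int) (k : Int) : GoodM a k (solution a k) := by
  have hsol : solution a k = (AA a k a.length).2.1 := rfl
  obtain ⟨sN, hsN, heq, hub, hre⟩ := A_fold a k a.length (le_refl _)
  rw [GoodM, hsol, heq]
  refine ⟨by simp; omega, fun u e hv => hub u e hv.2.1 hv, ?_⟩
  rcases hre with h0 | ⟨u, e, hv, he, hm⟩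
  · left; simpa using h0
  · right; exact ⟨u, e, hv, by simpa using hm⟩

-- ===== VERDICT (by name: the statement is the Claim_ definition above) =====
theorem solution_spec : Claim_equal_solution := by
  intro a k _
  exact GoodM_unique a k _ _ (A_good a k) (B_good a k)
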